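-- pv_equiv track=rewrite | github.com/dxzone12/AdventOfCode | 2022/16/main.py | calcPermScore
-- ===== SOURCE A (Python) =====
-- def getKey(node_1, node_2):
--     return tuple(sorted((node_1, node_2)))
--
-- def calcPermScore(permutation, shortest_path_map, map_of_pressures, time_limit):
--     this_perm_score = 0
--     previous_element = 'AA'
--     remaining_time = time_limit
--     for element in permutation[1:]:
--         travel_time = shortest_path_map[getKey(previous_element, element)]
--         total_time = travel_time + 1
--         remaining_time -= total_time
--         this_perm_score += map_of_pressures[element] * remaining_time
--         previous_element = element
--     return this_perm_score
-- ===== SOURCE B (Python) =====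
-- def getKey(node_1, node_2):
--     return tuple(sorted((node_1, node_2)))
--
-- def calcPermScore(permutation, shortest_path_map, map_of_pressures, time_limit):
--     # Exchange the order of summation: total = T * sum(pressures) - sum(step_cost * suffix_pressure_sum).
--     # go recurses to the end of the route first and returns (weighted_cost_sum, suffix_pressure_sum).
--     def go(prev, elems):
--         if not elems:
--             return (0, 0)
--         e = elems[0]
--         weighted, psum = go(e, elems[1:])
--         psum += map_of_pressures[e]
--         weighted += (shortest_path_map[getKey(prev, e)] + 1) * psum
--         return (weighted, psum)
--     weighted, psum = go('AA', permutation[1:])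
--     return time_limit * psum - weighted
-- ===== Notes on version B (the rewrite author's own statement) =====
-- stated objective: alternative
-- what changed: B exchanges the order of summation: instead of tracking remaining time and adding pressure*remaining per step, it recurses from the back of the route carrying suffix pressure sums and returns time_limit*sum(pressures) minus the sum of step_cost*suffix_pressure_sum.
import Mathlib
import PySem

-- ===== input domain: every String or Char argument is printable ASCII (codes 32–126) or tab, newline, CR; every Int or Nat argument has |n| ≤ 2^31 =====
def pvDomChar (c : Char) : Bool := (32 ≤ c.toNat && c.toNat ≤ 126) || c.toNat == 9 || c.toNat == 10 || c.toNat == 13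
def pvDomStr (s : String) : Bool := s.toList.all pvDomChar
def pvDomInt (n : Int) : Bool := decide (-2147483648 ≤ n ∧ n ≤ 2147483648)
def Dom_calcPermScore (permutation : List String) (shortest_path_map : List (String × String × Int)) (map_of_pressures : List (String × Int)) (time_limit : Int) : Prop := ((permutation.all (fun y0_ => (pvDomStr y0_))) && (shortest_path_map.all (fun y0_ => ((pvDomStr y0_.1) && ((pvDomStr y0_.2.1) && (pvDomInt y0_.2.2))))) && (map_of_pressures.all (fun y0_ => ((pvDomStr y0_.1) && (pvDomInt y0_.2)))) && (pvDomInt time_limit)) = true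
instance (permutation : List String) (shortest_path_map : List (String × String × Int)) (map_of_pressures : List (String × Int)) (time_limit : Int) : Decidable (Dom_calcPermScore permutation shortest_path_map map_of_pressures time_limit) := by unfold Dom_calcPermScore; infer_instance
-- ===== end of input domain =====

-- B swaps the order of summation (T*Σpressures − Σ cost·suffix-pressure-sum via back-to-front recursion) instead of A's forward remaining-time loop; objective: alternative, same cost.

-- Shared helpers (used by both ports and by Pre_):
-- getKey = tuple(sorted((a, b))): swap iff b < a; Python's str < is code-point lexicographic = Lean's < on toList (PySem).
def getKeyL (a b : String) : String × String := if b.toList < a.toList then (b, a) else (a, b)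

-- dict lookups on association lists: first match, like Python's dict (exact).
def lookupP? (m : List (String × Int)) (k : String) : Option Int :=
  match m with
  | [] => none
  | (a, v) :: rest => if a = k then some v else lookupP? rest k

def lookup2? (m : List (String × String × Int)) (k : String × String) : Option Int :=
  match m with
  | [] => none
  | (a, b, v) :: rest => if a = k.1 ∧ b = k.2 then some v else lookup2? rest k

-- ===== PORT A =====
-- one loop step of A: state = (this_perm_score, previous_element, remaining_time)
def stepA (shortest_path_map : List (String × String × Int)) (map_of_pressures : List (String × Int))
    (st : Int × String × Int) (element : String) : Int × String × Int :=
  let travel_time := (lookup2? shortest_path_map (getKeyL st.2.1 element)).getD 0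
  let total_time := travel_time + 1
  let remaining_time := st.2.2 - total_time
  (st.1 + (lookupP? map_of_pressures element).getD 0 * remaining_time, element, remaining_time)

def calcPermScore (permutation : List String) (shortest_path_map : List (String × String × Int)) (map_of_pressures : List (String × Int)) (time_limit : Int) : Int :=
  ((permutation.drop 1).foldl (stepA shortest_path_map map_of_pressures) (0, "AA", time_limit)).1

-- ===== PORT B =====
-- go prev elems = (Σ step_cost * suffix_pressure_sum, Σ pressures), computed back-to-front
def goB (shortest_path_map : List (String × String × Int)) (map_of_pressures : List (String × Int))
    (prev : String) : List String → Int × Int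
  | [] => (0, 0)
  | e :: rest =>
      let wp := goB shortest_path_map map_of_pressures e rest
      let psum := wp.2 + (lookupP? map_of_pressures e).getD 0
      (wp.1 + ((lookup2? shortest_path_map (getKeyL prev e)).getD 0 + 1) * psum, psum)

def calcPermScore_alt (permutation : List String) (shortest_path_map : List (String × String × Int)) (map_of_pressures : List (String × Int)) (time_limit : Int) : Int :=
  let wp := goB shortest_path_map map_of_pressures "AA" (permutation.drop 1)
  time_limit * wp.2 - wp.1

-- ===== PRECONDITION & SPEC =====
-- Pre_ excludes exactly the inputs on which Python A raises KeyError: some consecutive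
-- pair's sorted key is absent from shortest_path_map, or a visited element is absent
-- from map_of_pressures.
def Pre_calcPermScore (permutation : List String) (shortest_path_map : List (String × String × Int)) (map_of_pressures : List (String × Int)) (time_limit : Int) : Prop :=
  ∀ ab ∈ ("AA" :: permutation.drop 1).zip (permutation.drop 1),
    (∃ kv ∈ shortest_path_map, (kv.1, kv.2.1) = getKeyL ab.1 ab.2) ∧
    (∃ kv ∈ map_of_pressures, kv.1 = ab.2)
instance (permutation : List String) (shortest_path_map : List (String × String × Int)) (map_of_pressures : List (String × Int)) (time_limit : Int) : Decidable (Pre_calcPermScore permutation shortest_path_map map_of_pressures time_limit) := by unfold Pre_calcPermScore; infer_instance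

def pvWitness_calcPermScore : List String × (List (String × String × Int)) × (List (String × Int)) × Int :=
  (["AA", "BB", "CC"], [("AA", "BB", 2), ("BB", "CC", 1)], [("BB", 5), ("CC", 3)], 10)

def Spec_calcPermScore (permutation : List String) (shortest_path_map : List (String × String × Int)) (map_of_pressures : List (String × Int)) (time_limit : Int) (out : Int) : Prop := out = calcPermScore_alt permutation shortest_path_map map_of_pressures time_limit
instance (permutation : List String) (shortest_path_map : List (String × String × Int)) (map_of_pressures : List (String × Int)) (time_limit : Int) (out : Int) : Decidable (Spec_calcPermScore permutation shortest_path_map map_of_pressures time_limit out) := by unfold Spec_calcPermScore; infer_instance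

-- ===== CLAIM (what is proved, stated in full; the proofs are below) =====
def Claim_equal_calcPermScore : Prop := ∀ (permutation : List String) (shortest_path_map : List (String × String × Int)) (map_of_pressures : List (String × Int)) (time_limit : Int), Dom_calcPermScore permutation shortest_path_map map_of_pressures time_limit → Pre_calcPermScore permutation shortest_path_map map_of_pressures time_limit → Spec_calcPermScore permutation shortest_path_map map_of_pressures time_limit (calcPermScore permutation shortest_path_map map_of_pressures time_limit)

-- ===== LEMMAS AND PROOFS =====

-- Loop invariant: A's forward fold equals score + rem * Σpressures − Σ cost·suffixP, B's quantities.
lemma foldA_eq_goB (shortest_path_map : List (String × String × Int)) (map_of_pressures : List (String × Int))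
    (l : List String) (prev : String) (score rem : Int) :
    (l.foldl (stepA shortest_path_map map_of_pressures) (score, prev, rem)).1
      = score + rem * (goB shortest_path_map map_of_pressures prev l).2
          - (goB shortest_path_map map_of_pressures prev l).1 := by
  induction l generalizing prev score rem with
  | nil => simp [goB]
  | cons e tl ih =>
      rw [List.foldl_cons]
      have hstep : stepA shortest_path_map map_of_pressures (score, prev, rem) e
          = (score + (lookupP? map_of_pressures e).getD 0
                * (rem - ((lookup2? shortest_path_map (getKeyL prev e)).getD 0 + 1)), e,
             rem - ((lookup2? shortest_path_map (getKeyL prev e)).getD 0 + 1)) := by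
        simp [stepA]
      rw [hstep, ih]
      simp only [goB]
      ring

theorem calcPermScore_spec : Claim_equal_calcPermScore := by
  intro permutation shortest_path_map map_of_pressures time_limit _ _
  unfold Spec_calcPermScore calcPermScore calcPermScore_alt
  rw [foldA_eq_goB]
  ring
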